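-- pv_equiv track=rewrite | github.com/lailtonjunior/new_bpa_exp | bkp_bpa_exporter.py | _atribuir_folha_sequencia_final
-- ===== SOURCE A (Python) =====
-- def _atribuir_folha_sequencia_final(lista_registros_processados):
--     if not lista_registros_processados: return []
--     lista_registros_processados.sort(key=lambda r: (r.get('prd_cnsmed', ''), r.get('prd_dtaten', '')))
--     cns_atual, folha_atual, seq_atual = None, 0, 0
--     registros_numerados = []
--     for registro in lista_registros_processados:
--         if registro.get('prd_cnsmed') != cns_atual:
--             cns_atual = registro.get('prd_cnsmed')
--             folha_atual += 1
--             seq_atual = 1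
--         else:
--             seq_atual += 1
--             if seq_atual > 99:
--                 folha_atual += 1
--                 seq_atual = 1
--         registro_copia = registro.copy()
--         registro_copia['prd_flh'] = str(folha_atual).zfill(3)
--         registro_copia['prd_seq'] = str(seq_atual).zfill(2)
--         registros_numerados.append(registro_copia)
--     return registros_numerados
-- ===== SOURCE B (Python) =====
-- def _atribuir_folha_sequencia_final(lista_registros_processados):
--     lista_registros_processados.sort(key=lambda r: (r.get('prd_cnsmed', ''), r.get('prd_dtaten', '')))
--     keys = [r.get('prd_cnsmed') for r in lista_registros_processados]
--     # a new patient group starts wherever the key differs from its predecessor's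
--     starts = [k != p for p, k in zip([None] + keys, keys)]
--     # position of each record inside its group
--     pos, last = [], 0
--     for i, s in enumerate(starts):
--         if s:
--             last = i
--         pos.append(i - last)
--     # a fresh sheet opens at each group start and again after every 99 records of a group
--     turns = [s or (p > 0 and p % 99 == 0) for s, p in zip(starts, pos)]
--     resultado, folha = [], 0
--     for registro, turn, p in zip(lista_registros_processados, turns, pos):
--         folha += turn
--         copia = registro.copy()
--         copia['prd_flh'] = str(folha).zfill(3)
--         copia['prd_seq'] = str(p % 99 + 1).zfill(2)
--         resultado.append(copia)
--     return resultado
-- ===== Notes on version B (the rewrite author's own statement) =====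
-- stated objective: alternative
-- what changed: A threads a (cns_atual, folha_atual, seq_atual) state machine with branching through every record; B is a multi-pass pipeline: a keys list, pairwise-zip group-start flags, per-group positions, sheet-turn flags, and one stamping pass where seq is the closed form pos % 99 + 1 and folha is a running count of the turn flags.
import Mathlib
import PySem

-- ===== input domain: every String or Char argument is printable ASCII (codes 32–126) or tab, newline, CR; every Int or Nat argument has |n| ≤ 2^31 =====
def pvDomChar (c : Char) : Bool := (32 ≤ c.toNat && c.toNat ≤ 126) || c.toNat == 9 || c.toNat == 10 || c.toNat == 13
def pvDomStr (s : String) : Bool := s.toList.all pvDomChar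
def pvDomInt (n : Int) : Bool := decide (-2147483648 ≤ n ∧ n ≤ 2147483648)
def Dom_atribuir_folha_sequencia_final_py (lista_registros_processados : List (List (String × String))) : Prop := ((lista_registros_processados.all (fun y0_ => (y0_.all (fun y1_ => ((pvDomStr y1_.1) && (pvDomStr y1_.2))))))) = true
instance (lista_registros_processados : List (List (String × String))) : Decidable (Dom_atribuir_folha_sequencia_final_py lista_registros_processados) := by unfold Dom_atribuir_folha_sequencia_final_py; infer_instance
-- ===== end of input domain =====

-- B replaces A's per-record (cns_atual, folha_atual, seq_atual) state machine by a pipeline: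
-- a keys list, pairwise-zip group-start flags, per-group positions, sheet-turn flags, then one
-- stamping pass with seq = pos % 99 + 1 (objective: alternative decomposition, same cost).
-- Both A and B sort the input list in place in Python; the equivalence proved here is about
-- the RETURN value.

-- shared helpers (identical Python lines in A and B): dict lookups, the stamped copy
def pvKey (r : List (String × String)) : Option String := (PySem.Dict.mk r).get? "prd_cnsmed"
def pvSortKey1 (r : List (String × String)) : String := (PySem.Dict.mk r).getD "prd_cnsmed" ""
def pvSortKey2 (r : List (String × String)) : String := (PySem.Dict.mk r).getD "prd_dtaten" ""
def pvStamp (f sq : Int) (r : List (String × String)) : List (String × String) :=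
  (((PySem.Dict.mk r).insert "prd_flh" (PySem.Str.zfill (PySem.Int.toStr f) 3)).insert
      "prd_seq" (PySem.Str.zfill (PySem.Int.toStr sq) 2)).items

-- ===== PORT A =====
-- A's for-loop over the sorted list with state (cns_atual, folha_atual, seq_atual)
def pvALoop (c : Option String) (f sq : Int) : List (List (String × String)) → List (List (String × String))
  | [] => []
  | r :: rs =>
    if pvKey r ≠ c then
      pvStamp (f + 1) 1 r :: pvALoop (pvKey r) (f + 1) 1 rs
    else if sq + 1 > 99 then
      pvStamp (f + 1) 1 r :: pvALoop c (f + 1) 1 rs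
    else
      pvStamp f (sq + 1) r :: pvALoop c f (sq + 1) rs

def atribuir_folha_sequencia_final_py (lista_registros_processados : List (List (String × String))) : List (List (String × String)) :=
  if lista_registros_processados = [] then []
  else pvALoop none 0 0 (PySem.List.sorted2 lista_registros_processados pvSortKey1 pvSortKey2)

-- ===== PORT B =====
-- B's pos loop: `for i, s in enumerate(starts): if s: last = i; pos.append(i - last)`
def pvPos (i last : Nat) : List Bool → List Nat
  | [] => []
  | s :: t =>
    let last' := if s then i else last
    (i - last') :: pvPos (i + 1) last' t

-- B's final loop: `folha += turn` then stamp the copy with folha and pos % 99 + 1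
def pvStampLoop (folha : Int) : List ((List (String × String)) × (Bool × Nat)) → List (List (String × String))
  | [] => []
  | (r, turn, p) :: t =>
    let f := folha + (if turn then 1 else 0)
    pvStamp f (((p % 99 : Nat) : Int) + 1) r :: pvStampLoop f t

def atribuir_folha_sequencia_final_py_alt (lista_registros_processados : List (List (String × String))) : List (List (String × String)) :=
  let s := PySem.List.sorted2 lista_registros_processados pvSortKey1 pvSortKey2
  let keys := s.map pvKey
  let starts := List.zipWith (fun p k => decide (k ≠ p)) (none :: keys) keys
  let pos := pvPos 0 0 starts
  let turns := List.zipWith (fun (st : Bool) (p : Nat) => st || (decide (0 < p) && decide (p % 99 = 0))) starts pos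
  pvStampLoop 0 (s.zip (turns.zip pos))

-- ===== PRECONDITION & SPEC =====
def Spec_atribuir_folha_sequencia_final_py (lista_registros_processados : List (List (String × String))) (out : List (List (String × String))) : Prop := out = atribuir_folha_sequencia_final_py_alt lista_registros_processados
instance (lista_registros_processados : List (List (String × String))) (out : List (List (String × String))) : Decidable (Spec_atribuir_folha_sequencia_final_py lista_registros_processados out) := by unfold Spec_atribuir_folha_sequencia_final_py; infer_instance

-- ===== CLAIM (what is proved, stated in full; the proofs are below) =====
def Claim_equal_atribuir_folha_sequencia_final_py : Prop := ∀ (lista_registros_processados : List (List (String × String))), Dom_atribuir_folha_sequencia_final_py lista_registros_processados → Spec_atribuir_folha_sequencia_final_py lista_registros_processados (atribuir_folha_sequencia_final_py lista_registros_processados)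

-- ===== LEMMAS AND PROOFS =====

-- the fused scan both ports reduce to: state (previous key, folha, records so far in the run)
def pvFused (prev : Option String) (folha : Int) (m : Nat) : List (List (String × String)) → List (List (String × String))
  | [] => []
  | r :: t =>
    if pvKey r ≠ prev then
      pvStamp (folha + 1) 1 r :: pvFused (pvKey r) (folha + 1) 1 t
    else if 0 < m ∧ m % 99 = 0 then
      pvStamp (folha + 1) (((m % 99 : Nat) : Int) + 1) r :: pvFused (pvKey r) (folha + 1) (m + 1) t
    else
      pvStamp folha (((m % 99 : Nat) : Int) + 1) r :: pvFused (pvKey r) folha (m + 1) t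

-- A's seq value when m records of the current run have been emitted (0 only initially)
def pvS (m : Nat) : Int := if m = 0 then 0 else ((m - 1) % 99 : Nat) + 1

lemma pvA_eq_fused : ∀ (t : List (List (String × String))) (c : Option String) (fA : Int) (m : Nat),
    pvALoop c fA (pvS m) t = pvFused c fA m t := by
  intro t
  induction t with
  | nil => intro c fA m; rfl
  | cons r t ih =>
    intro c fA m
    rw [pvALoop, pvFused]
    by_cases hk : pvKey r ≠ c
    · rw [if_pos hk, if_pos hk]
      have h := ih (pvKey r) (fA + 1) 1
      rw [show pvS 1 = 1 from by norm_num [pvS]] at h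
      rw [h]
    · have hcc := hk
      rw [not_not] at hk
      rw [if_neg hcc, if_neg hcc, hk]
      by_cases hov : 0 < m ∧ m % 99 = 0
      · have hcond : pvS m + 1 > 99 := by
          unfold pvS; rw [if_neg (by omega)]; push_cast; omega
        rw [if_pos hcond, if_pos hov]
        have h := ih c (fA + 1) (m + 1)
        rw [show pvS (m + 1) = 1 from by
          unfold pvS; rw [if_neg (by omega)]; simp [hov.2]] at h
        rw [h, show ((m % 99 : Nat) : Int) + 1 = 1 from by rw [hov.2]; norm_num]
      · have hcond : ¬ (pvS m + 1 > 99) := by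
          unfold pvS; split_ifs with h0
          · norm_num
          · push_cast; omega
        rw [if_neg hcond, if_neg hov]
        have hseq : pvS m + 1 = ((m % 99 : Nat) : Int) + 1 := by
          unfold pvS; split_ifs with h0
          · subst h0; norm_num
          · push_cast; omega
        have h := ih c fA (m + 1)
        rw [show pvS (m + 1) = ((m % 99 : Nat) : Int) + 1 from by
          unfold pvS; rw [if_neg (by omega)]; norm_num] at h
        rw [hseq, h]

lemma pvB_eq_fused : ∀ (t : List (List (String × String))) (prev : Option String) (folha : Int) (i last : Nat),
    last ≤ i →
    pvStampLoop folha
      (t.zip ((List.zipWith (fun (st : Bool) (p : Nat) => st || (decide (0 < p) && decide (p % 99 = 0)))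
                (List.zipWith (fun p k => decide (k ≠ p)) (prev :: t.map pvKey) (t.map pvKey))
                (pvPos i last (List.zipWith (fun p k => decide (k ≠ p)) (prev :: t.map pvKey) (t.map pvKey)))).zip
              (pvPos i last (List.zipWith (fun p k => decide (k ≠ p)) (prev :: t.map pvKey) (t.map pvKey)))))
      = pvFused prev folha (i - last) t := by
  intro t
  induction t with
  | nil => intro prev folha i last _; rfl
  | cons r t ih =>
    intro prev folha i last hle
    simp only [List.map_cons, List.zipWith_cons_cons, pvPos, List.zip_cons_cons, pvStampLoop]
    rw [pvFused]
    by_cases hk : pvKey r ≠ prev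
    · rw [if_pos hk, decide_eq_true hk,
          show (if (true : Bool) = true then i else last) = i from rfl,
          show i - i = 0 from Nat.sub_self i,
          show (if ((true || (decide (0 < 0) && decide (0 % 99 = 0))) : Bool) = true then (1:Int) else 0) = 1 from rfl,
          show ((0 % 99 : Nat) : Int) + 1 = 1 from by norm_num]
      have h := ih (pvKey r) (folha + 1) (i + 1) i (Nat.le_succ i)
      rw [show i + 1 - i = 1 from by omega] at h
      rw [h]
    · rw [if_neg hk, decide_eq_false hk,
          show (if (false : Bool) = true then i else last) = last from rfl]
      by_cases hov : 0 < i - last ∧ (i - last) % 99 = 0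
      · rw [if_pos hov]
        have ht : (false || (decide (0 < i - last) && decide ((i - last) % 99 = 0))) = true := by
          simp [hov.1, hov.2]
        rw [ht, show (if (true : Bool) = true then (1:Int) else 0) = 1 from rfl]
        have h := ih (pvKey r) (folha + 1) (i + 1) last (Nat.le_succ_of_le hle)
        rw [show i + 1 - last = (i - last) + 1 from by omega] at h
        rw [h]
      · rw [if_neg hov]
        have ht : (false || (decide (0 < i - last) && decide ((i - last) % 99 = 0))) = false := by
          rcases Nat.eq_zero_or_pos (i - last) with h0 | h0
          · simp [h0]
          · have hno : ¬ (i - last) % 99 = 0 := fun hc => hov ⟨h0, hc⟩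
            simp [hno]
        rw [ht, show (if (false : Bool) = true then (1:Int) else 0) = 0 from rfl, add_zero]
        have h := ih (pvKey r) folha (i + 1) last (Nat.le_succ_of_le hle)
        rw [show i + 1 - last = (i - last) + 1 from by omega] at h
        rw [h]

lemma pvSorted2_nil : PySem.List.sorted2 ([] : List (List (String × String))) pvSortKey1 pvSortKey2 = [] := rfl

-- ===== VERDICT (by name: the statement is the Claim_ definition above) =====
theorem atribuir_folha_sequencia_final_py_spec : Claim_equal_atribuir_folha_sequencia_final_py := by
  intro l _
  unfold Spec_atribuir_folha_sequencia_final_py atribuir_folha_sequencia_final_py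
    atribuir_folha_sequencia_final_py_alt
  by_cases h : l = []
  · subst h
    rw [pvSorted2_nil]
    rfl
  · simp only [h, if_false]
    rw [show (0:Int) = pvS 0 from by norm_num [pvS], pvA_eq_fused]
    rw [show (0:Nat) = 0 - 0 from rfl]
    exact (pvB_eq_fused _ none 0 0 0 (Nat.le_refl 0)).symm
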